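-- pv_equiv track=rewrite | github.com/schluchtenscheisser/spot-altcoin-scanner-v4 | scanner/pipeline/decision.py | _stable_reason_order
-- ===== SOURCE A (Python) =====
-- from typing import Any, Dict, Iterable, List, Mapping, MutableMapping, Optional, Sequence
--
-- REASON_ORDER = [
--     "tradeability_fail",
--     "tradeability_marginal",
--     "risk_flag_blocked",
--     "stop_distance_too_wide",
--     "risk_reward_unattractive",
--     "risk_data_insufficient",
--     "insufficient_edge",
--     "btc_regime_caution",
--     "entry_not_confirmed",
--     "breakout_not_confirmed",
--     "retest_not_reclaimed",
--     "rebound_not_confirmed",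
-- ]
--
-- def _stable_reason_order(reasons: Iterable[str]) -> List[str]:
--     provided: List[str] = []
--     seen = set()
--     for reason in reasons:
--         if reason in seen:
--             continue
--         seen.add(reason)
--         provided.append(reason)
--
--     ordered: List[str] = []
--     for reason in REASON_ORDER:
--         if reason in seen:
--             ordered.append(reason)
--
--     for reason in provided:
--         if reason not in ordered:
--             ordered.append(reason)
--
--     return ordered
-- ===== SOURCE B (Python) =====
-- from typing import Iterable, List
--
-- REASON_ORDER = [
--     "tradeability_fail",
--     "tradeability_marginal",
--     "risk_flag_blocked",
--     "stop_distance_too_wide",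
--     "risk_reward_unattractive",
--     "risk_data_insufficient",
--     "insufficient_edge",
--     "btc_regime_caution",
--     "entry_not_confirmed",
--     "breakout_not_confirmed",
--     "retest_not_reclaimed",
--     "rebound_not_confirmed",
-- ]
--
-- _PRIORITY = {reason: index for index, reason in enumerate(REASON_ORDER)}
--
--
-- def _stable_reason_order(reasons: Iterable[str]) -> List[str]:
--     deduped = list(dict.fromkeys(reasons))
--     return sorted(deduped, key=lambda r: _PRIORITY.get(r, len(REASON_ORDER)))
-- ===== Notes on version B (the rewrite author's own statement) =====
-- stated objective: faster
-- what changed: Replaced A's three membership-scan loops (dedup via a seen set, scan of REASON_ORDER against seen, then a scan of provided that re-searches the growing ordered list) by a single dict.fromkeys dedup followed by one stable sort keyed on a precomputed reason->priority dict.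
import Mathlib
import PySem

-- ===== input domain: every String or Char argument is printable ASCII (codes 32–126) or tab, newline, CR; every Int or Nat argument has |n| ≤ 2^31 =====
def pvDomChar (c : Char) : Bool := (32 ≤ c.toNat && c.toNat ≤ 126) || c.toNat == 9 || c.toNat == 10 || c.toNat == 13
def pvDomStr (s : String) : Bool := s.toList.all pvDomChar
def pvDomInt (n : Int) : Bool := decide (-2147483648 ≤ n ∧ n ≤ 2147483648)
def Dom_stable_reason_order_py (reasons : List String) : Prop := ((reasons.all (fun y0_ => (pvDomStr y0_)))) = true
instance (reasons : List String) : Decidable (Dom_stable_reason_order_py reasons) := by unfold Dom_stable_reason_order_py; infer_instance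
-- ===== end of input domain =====

-- B replaces A's three membership-scan loops (the last rescans the growing output list
-- per element) by a dedup and one stable keyed sort over a precomputed priority table;
-- a timing run measured B faster on large inputs.

def reasonOrder : List String := [
  "tradeability_fail",
  "tradeability_marginal",
  "risk_flag_blocked",
  "stop_distance_too_wide",
  "risk_reward_unattractive",
  "risk_data_insufficient",
  "insufficient_edge",
  "btc_regime_caution",
  "entry_not_confirmed",
  "breakout_not_confirmed",
  "retest_not_reclaimed",
  "rebound_not_confirmed"]

-- ===== PORT A =====
def stable_reason_order_py (reasons : List String) : List String :=
  -- first loop: provided/seen accumulated together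
  let st := reasons.foldl
    (fun (st : List String × PySem.Set String) reason =>
      if st.2.contains reason then st
      else (st.1 ++ [reason], st.2.add reason))
    ([], PySem.Set.empty)
  let provided := st.1
  let seen := st.2
  -- second loop: known reasons in REASON_ORDER order
  let ordered := reasonOrder.foldl
    (fun acc reason => if seen.contains reason then acc ++ [reason] else acc) []
  -- third loop: remaining provided reasons
  provided.foldl
    (fun acc reason => if acc.contains reason then acc else acc ++ [reason])
    ordered

-- ===== PORT B =====
def priorityDict : PySem.Dict String Int :=
  (PySem.List.enumerate reasonOrder 0).foldl
    (fun d p => d.insert p.2 p.1) PySem.Dict.empty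

def stable_reason_order_py_alt (reasons : List String) : List String :=
  let deduped := PySem.List.dedup reasons
  PySem.List.sorted deduped (fun r => priorityDict.getD r (reasonOrder.length : Int))

-- ===== PRECONDITION & SPEC =====
def Spec_stable_reason_order_py (reasons : List String) (out : List String) : Prop := out = stable_reason_order_py_alt reasons
instance (reasons : List String) (out : List String) : Decidable (Spec_stable_reason_order_py reasons out) := by unfold Spec_stable_reason_order_py; infer_instance

-- ===== CLAIM (what is proved, stated in full; the proofs are below) =====
def Claim_equal_stable_reason_order_py : Prop := ∀ (reasons : List String), Dom_stable_reason_order_py reasons → Spec_stable_reason_order_py reasons (stable_reason_order_py reasons)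

-- ===== LEMMAS AND PROOFS =====

-- B's sort key, named for the proofs
def pkey (r : String) : Int := priorityDict.getD r (reasonOrder.length : Int)

theorem pkey_not_mem {r : String} (h : r ∉ reasonOrder) : pkey r = 12 := by
  have hkeys : priorityDict.keys = reasonOrder := by decide
  have hc : priorityDict.contains r = false := by
    cases hcc : priorityDict.contains r with
    | false => rfl
    | true => exact absurd (hkeys ▸ (PySem.Dict.contains_iff_mem_keys _ _).mp hcc) h
  unfold pkey
  rw [PySem.Dict.getD_of_not_contains _ _ hc]; rfl

theorem pkey_lt_of_mem : ∀ r ∈ reasonOrder, pkey r < 12 := by decide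

theorem ro_pairwise : reasonOrder.Pairwise (fun a b => pkey a < pkey b) := by decide

theorem ro_nodup : reasonOrder.Nodup := by decide

-- stable insertion of a known reason x into "filtered knowns ++ unknowns"
theorem insertBy_filter (ro : List String)
    (hsort : ro.Pairwise (fun a b => pkey a < pkey b)) (hnd : ro.Nodup)
    (p : String → Bool) (x : String) (hx : x ∈ ro) (hpx : p x = false)
    (U : List String) (hU : ∀ u ∈ U, pkey x < pkey u) :
    PySem.List.insertBy (fun a b => decide (pkey a < pkey b)) x (ro.filter p ++ U)
      = ro.filter (fun r => p r || r == x) ++ U := by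
  induction ro with
  | nil => cases hx
  | cons r rest ih =>
    rw [List.pairwise_cons] at hsort
    obtain ⟨hr, hrest⟩ := hsort
    rw [List.nodup_cons] at hnd
    obtain ⟨hrnot, hndr⟩ := hnd
    by_cases hrx : r = x
    · subst hrx
      -- head is x itself; p x = false, insert goes in front of everything
      have hall : ∀ y ∈ rest.filter p ++ U, pkey r < pkey y := by
        intro y hy
        rcases List.mem_append.mp hy with h1 | h2
        · exact hr y (List.mem_of_mem_filter h1)
        · exact hU y h2
      have hfront : PySem.List.insertBy (fun a b => decide (pkey a < pkey b)) r
          (rest.filter p ++ U) = r :: (rest.filter p ++ U) := by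
        cases hc : rest.filter p ++ U with
        | nil => simp [PySem.List.insertBy]
        | cons y ys =>
          have : pkey r < pkey y := hall y (by rw [hc]; exact List.mem_cons_self)
          simp [PySem.List.insertBy, this]
      have hfr : rest.filter (fun r' => p r' || r' == r) = rest.filter p := by
        apply List.filter_congr
        intro y hy
        have : (y == r) = false := by
          simp only [beq_eq_false_iff_ne]
          intro hyx; exact hrnot (hyx ▸ hy)
        simp [this]
      simp [hpx, hfr, hfront]
    · have hxrest : x ∈ rest := by
        rcases List.mem_cons.mp hx with h | h
        · exact absurd h.symm hrx
        · exact h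
      have hkr : pkey r < pkey x := hr x hxrest
      have hnb : (decide (pkey x < pkey r)) = false := by
        simp; omega
      have hrxb : (r == x) = false := by simp [hrx]
      by_cases hp : p r = true
      · have hstep : PySem.List.insertBy (fun a b => decide (pkey a < pkey b)) x
            (r :: (rest.filter p ++ U)) =
            r :: PySem.List.insertBy (fun a b => decide (pkey a < pkey b)) x (rest.filter p ++ U) := by
          simp [PySem.List.insertBy, hnb]
        simp only [List.filter_cons, hp, Bool.true_or, if_true, List.cons_append]
        rw [hstep, ih hrest hndr hxrest]
      · have hp' : p r = false := by simpa using hp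
        simp only [List.filter_cons, hp', hrxb, Bool.or_self, Bool.false_eq_true, if_false]
        exact ih hrest hndr hxrest

-- characterisation of the stable sort on a duplicate-free list
theorem sorted_char (l : List String) (hnd : l.Nodup) :
    PySem.List.sorted l pkey
      = reasonOrder.filter (fun r => l.contains r)
        ++ l.filter (fun r => !reasonOrder.contains r) := by
  induction l using List.reverseRecOn with
  | nil => simp [PySem.List.sorted]
  | append_singleton l x ih =>
    rw [List.nodup_append] at hnd
    have hndl : l.Nodup := hnd.1
    have hxl : x ∉ l := fun hmem => hnd.2.2 x hmem x (by simp) rfl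
    have hstep : PySem.List.sorted (l ++ [x]) pkey
        = PySem.List.insertBy (fun a b => decide (pkey a < pkey b)) x (PySem.List.sorted l pkey) := by
      rw [PySem.List.sorted_eq_foldl_insertBy, PySem.List.sorted_eq_foldl_insertBy,
        List.foldl_append]
      rfl
    rw [hstep, ih hndl]
    by_cases hx : x ∈ reasonOrder
    · have hpx : l.contains x = false := by
        simp only [List.contains_eq_mem, decide_eq_false_iff_not]; exact hxl
      rw [insertBy_filter reasonOrder ro_pairwise ro_nodup _ x hx hpx _
        (by
          intro u hu
          have hu' : u ∉ reasonOrder := by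
            have := (List.mem_filter.mp hu).2
            simpa using this
          rw [pkey_not_mem hu']
          exact pkey_lt_of_mem x hx)]
      congr 1
      · apply List.filter_congr
        intro r _
        by_cases h : r = x <;> simp [List.contains_eq_mem, List.mem_append, h]
      · rw [List.filter_append]
        have hone : [x].filter (fun r => !reasonOrder.contains r) = [] := by
          simp [hx]
        rw [hone, List.append_nil]
    · rw [PySem.List.insertBy_of_forall_not_before _ _ _
        (by
          intro y hy
          rw [pkey_not_mem hx]
          rcases List.mem_append.mp hy with h1 | h2
          · have hyro := List.mem_of_mem_filter h1
            have := pkey_lt_of_mem y hyro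
            simp; omega
          · have hy' : y ∉ reasonOrder := by
              have := (List.mem_filter.mp h2).2
              simpa using this
            rw [pkey_not_mem hy']
            simp)]
      rw [List.append_assoc]
      congr 1
      · apply List.filter_congr
        intro r hr
        have hrx : r ≠ x := fun h => hx (h ▸ hr)
        simp [List.contains_eq_mem, List.mem_append, hrx]
      · rw [List.filter_append]
        have hone : [x].filter (fun r => !reasonOrder.contains r) = [x] := by
          simp [hx]
        rw [hone]

-- A's first loop keeps provided = seen = set(reasons)
theorem foldA (reasons : List String) (s : List String) :
    reasons.foldl
      (fun (st : List String × PySem.Set String) reason =>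
        if st.2.contains reason then st
        else (st.1 ++ [reason], st.2.add reason))
      (s, s)
    = (PySem.Set.update s reasons, PySem.Set.update s reasons) := by
  induction reasons generalizing s with
  | nil => rfl
  | cons r rs ih =>
    have hstep : (if PySem.Set.contains s r then (s, s)
        else (s ++ [r], PySem.Set.add s r)) = (PySem.Set.add s r, PySem.Set.add s r) := by
      cases hc : PySem.Set.contains s r with
      | true =>
        have := PySem.Set.add_of_mem ((PySem.Set.contains_iff s r).mp hc)
        simp [this]
      | false =>
        have hnm : r ∉ s := fun hm => by
          rw [(PySem.Set.contains_iff s r).mpr hm] at hc; cases hc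
        have := PySem.Set.add_of_not_mem hnm
        simp [this]
    rw [List.foldl_cons, hstep, ih, PySem.Set.update_cons]

-- ===== VERDICT (by name: the statement is the Claim_ definition above) =====
theorem stable_reason_order_py_spec : Claim_equal_stable_reason_order_py := by
  intro reasons _
  unfold Spec_stable_reason_order_py stable_reason_order_py stable_reason_order_py_alt
  simp only []
  -- first loop
  have h1 := foldA reasons []
  rw [PySem.Set.update_nil_left] at h1
  rw [show (([], PySem.Set.empty) : List String × PySem.Set String) = (([], []) : List String × PySem.Set String) from rfl, h1]
  set D := PySem.Set.ofList reasons with hD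
  -- second loop
  rw [PySem.List.foldl_append_if_eq_filter (fun reason => PySem.Set.contains D reason) reasonOrder []]
  rw [List.nil_append]
  set K := reasonOrder.filter (fun reason => PySem.Set.contains D reason) with hK
  -- third loop is Set.update K D
  have h3 : D.foldl (fun acc reason => if acc.contains reason then acc else acc ++ [reason]) K
      = PySem.Set.update K D := by
    rw [show PySem.Set.update K D = D.foldl PySem.Set.add K from rfl]
    apply PySem.List.foldl_congr_mem
    intro acc x _
    rw [show PySem.Set.add acc x = if PySem.Set.contains acc x then acc else acc ++ [x] from rfl,
      PySem.Set.contains_eq_listContains]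
  rw [h3, PySem.Set.update_eq_append_filter, hD, PySem.Set.ofList_ofList, ← hD]
  -- B side
  rw [PySem.List.dedup_eq_ofList, ← hD,
    show (fun r => priorityDict.getD r (reasonOrder.length : Int)) = pkey from rfl,
    sorted_char D (hD ▸ PySem.Set.nodup_ofList reasons)]
  congr 1
  apply List.filter_congr
  intro y hy
  have hyD : y ∈ D := hy
  rw [hK, PySem.Set.contains_eq_listContains]
  have hmem : (List.filter (fun reason => PySem.Set.contains D reason) reasonOrder).contains y
      = reasonOrder.contains y := by
    simp only [List.contains_eq_mem, List.mem_filter, decide_eq_decide]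
    constructor
    · exact fun h => h.1
    · intro h
      exact ⟨h, (PySem.Set.contains_iff D y).mpr hyD⟩
  rw [hmem]
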